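-- pv_equiv track=rewrite | github.com/cereal-lab/Papers | 2025-GECCO-tan-SeqDenoise_V1/NSGA-II/utils/config_utils.py | processedString_2
-- ===== SOURCE A (Python) =====
-- def processedString_2(str2, removedChar, keep):
--
--     count = 0
--     seq = ""
--     for j in str2:
--         if count < len(keep):
--             if j == removedChar and keep[count] == 1:
--                 count += 1
--                 seq += j
--                 continue
--         if j == removedChar:
--             count += 1
--             continue
--         seq += j
--
--     return seq
-- ===== SOURCE B (Python) =====
-- def processedString_2(str2, removedChar, keep):
--     # Split on the removed character and re-insert a delimiter only where the keep mask says 1.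
--     if len(removedChar) != 1:
--         return str2  # no single character can equal removedChar, so nothing is removed
--     parts = str2.split(removedChar)
--     seq = parts[0]
--     for i, part in enumerate(parts[1:]):
--         if i < len(keep) and keep[i] == 1:
--             seq += removedChar
--         seq += part
--     return seq
-- ===== Notes on version B (the rewrite author's own statement) =====
-- stated objective: faster
-- what changed: Replaces A's character-by-character scan with its occurrence counter, len-guarded mask indexing and per-character string concatenation by splitting str2 on removedChar once and reassembling the parts, re-inserting the delimiter exactly where the keep mask entry is 1 (with a guard returning str2 unchanged when removedChar is not a single character, where no character comparison can ever fire).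
import Mathlib
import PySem

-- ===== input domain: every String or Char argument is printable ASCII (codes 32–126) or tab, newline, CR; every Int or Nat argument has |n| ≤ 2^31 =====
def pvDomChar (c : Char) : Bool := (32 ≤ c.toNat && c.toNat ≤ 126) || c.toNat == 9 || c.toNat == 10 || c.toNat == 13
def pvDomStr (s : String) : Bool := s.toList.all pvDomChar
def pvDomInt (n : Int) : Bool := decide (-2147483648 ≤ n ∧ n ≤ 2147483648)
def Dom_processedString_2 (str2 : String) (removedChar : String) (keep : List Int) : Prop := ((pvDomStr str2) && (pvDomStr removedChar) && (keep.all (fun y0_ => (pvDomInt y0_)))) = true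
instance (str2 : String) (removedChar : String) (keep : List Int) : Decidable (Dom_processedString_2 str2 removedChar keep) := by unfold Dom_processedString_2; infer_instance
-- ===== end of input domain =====

-- B replaces A's character-by-character counter scan by split-on-the-removed-character and
-- reassembly of the parts guided by the keep mask (objective: faster, measured).

-- ===== PORT A =====
-- counter/accumulator fold over the characters of str2, exactly A's branch order;
-- 'j == removedChar' compares the 1-char string 'String.singleton j' with removedChar, as Python does
def processedString_2 (str2 : String) (removedChar : String) (keep : List Int) : String :=
  (str2.toList.foldl (fun (st : Int × String) j =>
      if st.1 < (keep.length : Int) ∧ String.singleton j = removedChar ∧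
          PySem.List.pyGet? keep st.1 = some 1 then
        (st.1 + 1, st.2.push j)
      else if String.singleton j = removedChar then
        (st.1 + 1, st.2)
      else
        (st.1, st.2.push j)) ((0 : Int), "")).2

-- ===== PORT B =====
-- Source B: guard on len(removedChar) != 1, then str2.split(removedChar), seq = parts[0],
-- and a loop over enumerate(parts[1:]) re-inserting the delimiter where the mask is 1.
-- PySem.Str.split? is str.split(sep); it is 'some …' here since the guard ensures sep ≠ ""
-- (the 'none' arm is unreachable); parts[0] is 'headD ""' (split always returns ≥ 1 part).
def processedString_2_alt (str2 : String) (removedChar : String) (keep : List Int) : String :=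
  if PySem.Str.len removedChar ≠ 1 then str2
  else
    match PySem.Str.split? str2 removedChar with
    | none => str2
    | some parts =>
      (PySem.List.enumerate (PySem.List.slice parts (some 1) none) 0).foldl
        (fun seq (p : Int × String) =>
          (if p.1 < (keep.length : Int) ∧ PySem.List.pyGet? keep p.1 = some 1 then
            seq ++ removedChar else seq) ++ p.2)
        (parts.headD "")

-- ===== PRECONDITION & SPEC =====
def Spec_processedString_2 (str2 : String) (removedChar : String) (keep : List Int) (out : String) : Prop := out = processedString_2_alt str2 removedChar keep
instance (str2 : String) (removedChar : String) (keep : List Int) (out : String) : Decidable (Spec_processedString_2 str2 removedChar keep out) := by unfold Spec_processedString_2; infer_instance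

-- ===== CLAIM (what is proved, stated in full; the proofs are below) =====
def Claim_equal_processedString_2 : Prop := ∀ (str2 : String) (removedChar : String) (keep : List Int), Dom_processedString_2 str2 removedChar keep → Spec_processedString_2 str2 removedChar keep (processedString_2 str2 removedChar keep)

-- ===== LEMMAS AND PROOFS =====

-- char-level description of A's scan: the k-th occurrence of c survives iff the k-th mask entry is 1
def pvGo (c : Char) : List Char → List Int → List Char
  | [], _ => []
  | a :: cs, ks =>
    if a = c then
      match ks with
      | [] => pvGo c cs []
      | k :: ks' => if k = 1 then c :: pvGo c cs ks' else pvGo c cs ks'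
    else a :: pvGo c cs ks

-- structural single-character split: (first part, remaining parts)
def pvSplit (c : Char) : List Char → List Char × List (List Char)
  | [] => ([], [])
  | a :: cs =>
    if a = c then ([], (pvSplit c cs).1 :: (pvSplit c cs).2)
    else (a :: (pvSplit c cs).1, (pvSplit c cs).2)

-- char-level description of B's reassembly loop over the remaining parts
def pvAsm (c : Char) : List (List Char) → List Int → List Char
  | [], _ => []
  | p :: ps, [] => p ++ pvAsm c ps []
  | p :: ps, k :: ks => (if k = 1 then [c] else []) ++ (p ++ pvAsm c ps ks)

-- A's loop invariant: the fold from state (↑n, seq) appends pvGo on keep.drop n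
theorem pv_main (removedChar : String) (c : Char) (hc : removedChar.toList = [c]) (keep : List Int) :
    ∀ (cs : List Char) (n : Nat) (seq : String),
      ((cs.foldl (fun (st : Int × String) j =>
          if st.1 < (keep.length : Int) ∧ String.singleton j = removedChar ∧
              PySem.List.pyGet? keep st.1 = some 1 then
            (st.1 + 1, st.2.push j)
          else if String.singleton j = removedChar then
            (st.1 + 1, st.2)
          else
            (st.1, st.2.push j)) ((n : Int), seq)).2).toList
        = seq.toList ++ pvGo c cs (keep.drop n) := by
  have hiff : ∀ j : Char, String.singleton j = removedChar ↔ j = c := by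
    intro j
    constructor
    · intro h
      have h2 := congrArg String.toList h
      simpa [hc] using h2
    · rintro rfl
      apply String.toList_inj.mp
      simp [hc]
  intro cs
  induction cs with
  | nil => intro n seq; simp [pvGo]
  | cons a cs ih =>
    intro n seq
    by_cases hP : a = c
    · subst hP
      have hPs : String.singleton a = removedChar := (hiff a).mpr rfl
      by_cases hn : n < keep.length
      · have hdrop : keep.drop n = keep[n] :: keep.drop (n + 1) :=
          List.drop_eq_getElem_cons hn
        have hget : PySem.List.pyGet? keep (n : Int) = some keep[n] := by
          simp [PySem.List.pyGet?_natCast, List.getElem?_eq_getElem hn]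
        by_cases hk : keep[n] = 1
        · have hcond : ((n : Int) < (keep.length : Int) ∧ String.singleton a = removedChar ∧
              PySem.List.pyGet? keep (n : Int) = some 1) :=
            ⟨by exact_mod_cast hn, hPs, by rw [hget, hk]⟩
          simp only [List.foldl_cons, if_pos hcond]
          have h1 : ((n : Int) + 1) = ((n + 1 : Nat) : Int) := by push_cast; ring
          rw [h1, ih (n + 1) (seq.push a), hdrop]
          simp [pvGo, hk, String.toList_push]
        · have hcond : ¬ ((n : Int) < (keep.length : Int) ∧ String.singleton a = removedChar ∧
              PySem.List.pyGet? keep (n : Int) = some 1) := by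
            rintro ⟨-, -, h⟩
            rw [hget] at h
            exact hk (Option.some.inj h)
          simp only [List.foldl_cons, if_neg hcond, if_pos hPs]
          have h1 : ((n : Int) + 1) = ((n + 1 : Nat) : Int) := by push_cast; ring
          rw [h1, ih (n + 1) seq, hdrop]
          simp [pvGo, hk]
      · have hdrop : keep.drop n = [] := List.drop_eq_nil_of_le (Nat.le_of_not_lt hn)
        have hcond : ¬ ((n : Int) < (keep.length : Int) ∧ String.singleton a = removedChar ∧
            PySem.List.pyGet? keep (n : Int) = some 1) := by
          rintro ⟨h, -, -⟩
          exact hn (by exact_mod_cast h)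
        simp only [List.foldl_cons, if_neg hcond, if_pos hPs]
        have h1 : ((n : Int) + 1) = ((n + 1 : Nat) : Int) := by push_cast; ring
        have hdrop' : keep.drop (n + 1) = [] :=
          List.drop_eq_nil_of_le (Nat.le_succ_of_le (Nat.le_of_not_lt hn))
        rw [h1, ih (n + 1) seq, hdrop, hdrop']
        simp [pvGo]
    · have hPs : ¬ String.singleton a = removedChar := fun h => hP ((hiff a).mp h)
      have hcond : ¬ ((n : Int) < (keep.length : Int) ∧ String.singleton a = removedChar ∧
          PySem.List.pyGet? keep (n : Int) = some 1) := by
        rintro ⟨-, h, -⟩; exact hPs h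
      simp only [List.foldl_cons, if_neg hcond, if_neg hPs]
      rw [ih n (seq.push a)]
      simp [pvGo, hP, String.toList_push]

-- when no single character equals removedChar, A's scan copies str2 unchanged
theorem pv_noRemove (removedChar : String) (keep : List Int)
    (hne : ∀ j : Char, String.singleton j ≠ removedChar) :
    ∀ (cs : List Char) (n : Int) (seq : String),
      ((cs.foldl (fun (st : Int × String) j =>
          if st.1 < (keep.length : Int) ∧ String.singleton j = removedChar ∧
              PySem.List.pyGet? keep st.1 = some 1 then
            (st.1 + 1, st.2.push j)
          else if String.singleton j = removedChar then
            (st.1 + 1, st.2)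
          else
            (st.1, st.2.push j)) (n, seq)).2).toList
        = seq.toList ++ cs := by
  intro cs
  induction cs with
  | nil => intro n seq; simp
  | cons a cs ih =>
    intro n seq
    have hcond : ¬ (n < (keep.length : Int) ∧ String.singleton a = removedChar ∧
        PySem.List.pyGet? keep n = some 1) := by
      rintro ⟨-, h, -⟩; exact hne a h
    simp only [List.foldl_cons, if_neg hcond, if_neg (hne a)]
    rw [ih n (seq.push a)]
    simp [String.toList_push]

-- PySem's fuel-based splitOn, specialised to a single-character separator, is pvSplit
theorem pv_splitOn_go (c : Char) :
    ∀ (fuel : Nat) (l cur : List Char) (acc : List (List Char)), l.length ≤ fuel →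
      PySem.Chars.splitOn.go [c] fuel l cur acc
        = acc.reverse ++ ((cur.reverse ++ (pvSplit c l).1) :: (pvSplit c l).2) := by
  intro fuel
  induction fuel with
  | zero =>
    intro l cur acc hl
    have : l = [] := List.eq_nil_of_length_eq_zero (Nat.le_zero.mp hl)
    subst this
    rw [PySem.Chars.splitOn.go.eq_def]
    simp [pvSplit]
  | succ fuel ih =>
    intro l cur acc hl
    cases l with
    | nil =>
      rw [PySem.Chars.splitOn.go.eq_def]
      simp [pvSplit]
    | cons a rest =>
      rw [PySem.Chars.splitOn.go.eq_def]
      have hpre : [c].isPrefixOf (a :: rest) = (c == a) := by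
        simp [List.isPrefixOf]
      by_cases hac : a = c
      · subst hac
        simp only [hpre, beq_self_eq_true, if_pos]
        rw [List.length_cons] at hl
        rw [show List.drop [a].length (a :: rest) = rest from rfl]
        rw [ih rest [] (cur.reverse :: acc) (Nat.le_of_succ_le_succ hl)]
        simp [pvSplit]
      · have hba : (c == a) = false := by simpa using fun h : c = a => hac h.symm
        simp only [hpre, hba]
        rw [if_neg (by simp)]
        rw [List.length_cons] at hl
        rw [ih rest (a :: cur) acc (Nat.le_of_succ_le_succ hl)]
        simp [pvSplit, hac]

theorem pv_splitOn_single (c : Char) (cs : List Char) :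
    PySem.Chars.splitOn cs [c] = (pvSplit c cs).1 :: (pvSplit c cs).2 := by
  unfold PySem.Chars.splitOn
  rw [pv_splitOn_go c (cs.length + 1) cs [] [] (by omega)]
  simp

-- A's char-level result is exactly: first part, then the mask-guided reassembly of the rest
theorem pv_go_split (c : Char) :
    ∀ (cs : List Char) (ks : List Int),
      pvGo c cs ks = (pvSplit c cs).1 ++ pvAsm c (pvSplit c cs).2 ks := by
  intro cs
  induction cs with
  | nil => intro ks; simp [pvGo, pvSplit, pvAsm]
  | cons a cs ih =>
    intro ks
    by_cases hac : a = c
    · subst hac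
      cases ks with
      | nil => simp [pvGo, pvSplit, pvAsm, ih]
      | cons k ks' =>
        by_cases hk : k = 1
        · simp [pvGo, pvSplit, pvAsm, hk, ih]
        · simp [pvGo, pvSplit, pvAsm, hk, ih]
    · simp [pvGo, pvSplit, hac, ih]

-- B's loop invariant: the fold over enumerate(parts[1:]) starting at index n builds pvAsm on keep.drop n
theorem pv_alt_main (removedChar : String) (c : Char) (hc : removedChar.toList = [c]) (keep : List Int) :
    ∀ (ps : List (List Char)) (n : Nat) (seq : String),
      ((PySem.List.enumerate (ps.map String.ofList) (n : Int)).foldl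
        (fun seq (p : Int × String) =>
          (if p.1 < (keep.length : Int) ∧ PySem.List.pyGet? keep p.1 = some 1 then
            seq ++ removedChar else seq) ++ p.2) seq).toList
        = seq.toList ++ pvAsm c ps (keep.drop n) := by
  intro ps
  induction ps with
  | nil => intro n seq; simp [pvAsm]
  | cons p ps ih =>
    intro n seq
    rw [List.map_cons, PySem.List.enumerate_cons, List.foldl_cons]
    have h1 : ((n : Int) + 1) = ((n + 1 : Nat) : Int) := by push_cast; ring
    by_cases hn : n < keep.length
    · have hdrop : keep.drop n = keep[n] :: keep.drop (n + 1) :=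
        List.drop_eq_getElem_cons hn
      have hget : PySem.List.pyGet? keep (n : Int) = some keep[n] := by
        simp [PySem.List.pyGet?_natCast, List.getElem?_eq_getElem hn]
      by_cases hk : keep[n] = 1
      · have hcond : ((n : Int) < (keep.length : Int) ∧
            PySem.List.pyGet? keep (n : Int) = some 1) :=
          ⟨by exact_mod_cast hn, by rw [hget, hk]⟩
        rw [if_pos hcond, h1, ih (n + 1) ((seq ++ removedChar) ++ String.ofList p), hdrop]
        simp [pvAsm, hk, String.toList_append, hc]
      · have hcond : ¬ ((n : Int) < (keep.length : Int) ∧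
            PySem.List.pyGet? keep (n : Int) = some 1) := by
          rintro ⟨-, h⟩
          rw [hget] at h
          exact hk (Option.some.inj h)
        rw [if_neg hcond, h1, ih (n + 1) (seq ++ String.ofList p), hdrop]
        simp [pvAsm, hk, String.toList_append]
    · have hdrop : keep.drop n = [] := List.drop_eq_nil_of_le (Nat.le_of_not_lt hn)
      have hdrop' : keep.drop (n + 1) = [] :=
        List.drop_eq_nil_of_le (Nat.le_succ_of_le (Nat.le_of_not_lt hn))
      have hcond : ¬ ((n : Int) < (keep.length : Int) ∧
          PySem.List.pyGet? keep (n : Int) = some 1) := by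
        rintro ⟨h, -⟩
        exact hn (by exact_mod_cast h)
      rw [if_neg hcond, h1, ih (n + 1) (seq ++ String.ofList p), hdrop, hdrop']
      simp [pvAsm, String.toList_append]

-- unfolding B's port when the separator is a single character (so split? is 'some')
theorem pv_alt_some (str2 removedChar : String) (keep : List Int) (parts : List String)
    (h1 : PySem.Str.len removedChar = 1)
    (h : PySem.Str.split? str2 removedChar = some parts) :
    processedString_2_alt str2 removedChar keep
      = (PySem.List.enumerate (PySem.List.slice parts (some 1) none) 0).foldl
          (fun seq (p : Int × String) =>
            (if p.1 < (keep.length : Int) ∧ PySem.List.pyGet? keep p.1 = some 1 then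
              seq ++ removedChar else seq) ++ p.2)
          (parts.headD "") := by
  unfold processedString_2_alt
  rw [if_neg (not_not_intro h1), h]

-- ===== VERDICT (by name: the statement is the Claim_ definition above) =====
theorem processedString_2_spec : Claim_equal_processedString_2 := by
  intro str2 removedChar keep _
  unfold Spec_processedString_2
  by_cases hlen : PySem.Str.len removedChar = 1
  · -- single-character separator: split/reassemble equals the scan
    have hL : removedChar.toList.length = 1 := by
      have h := hlen
      simp [PySem.Str.len] at h
      simpa using h
    obtain ⟨c, hc⟩ := List.length_eq_one_iff.mp hL
    have hsplit : PySem.Str.split? str2 removedChar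
        = some (((pvSplit c str2.toList).1 :: (pvSplit c str2.toList).2).map String.ofList) := by
      simp [PySem.Str.split?, PySem.Chars.split?, hc, pv_splitOn_single]
    have hAeq : (processedString_2 str2 removedChar keep).toList
        = (pvSplit c str2.toList).1 ++ pvAsm c (pvSplit c str2.toList).2 keep := by
      unfold processedString_2
      have hA := pv_main removedChar c hc keep str2.toList 0 ""
      norm_num at hA
      rw [hA, pv_go_split]
    have hBeq : (processedString_2_alt str2 removedChar keep).toList
        = (pvSplit c str2.toList).1 ++ pvAsm c (pvSplit c str2.toList).2 keep := by
      rw [pv_alt_some str2 removedChar keep _ hlen hsplit]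
      have hB := pv_alt_main removedChar c hc keep (pvSplit c str2.toList).2 0
        (String.ofList (pvSplit c str2.toList).1)
      norm_num at hB
      rw [List.map_cons]
      rw [PySem.List.slice_from _ (by norm_num : (0:Int) ≤ 1)]
      simp only [Int.toNat_one, List.drop_one, List.tail_cons, List.headD_cons]
      exact hB
    apply String.toList_inj.mp
    rw [hAeq, hBeq]
  · -- empty or multi-character removedChar: no character comparison ever fires, both return str2
    have halt : processedString_2_alt str2 removedChar keep = str2 := by
      unfold processedString_2_alt
      rw [if_pos hlen]
    rw [halt]
    have hne : ∀ j : Char, String.singleton j ≠ removedChar := by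
      intro j h
      apply hlen
      have h2 : removedChar.toList = [j] := by
        have := congrArg String.toList h
        simpa using this.symm
      simp [PySem.Str.len, h2]
    apply String.toList_inj.mp
    unfold processedString_2
    rw [pv_noRemove removedChar keep hne str2.toList 0 ""]
    simp
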